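-- pv_equiv track=rewrite | github.com/ValadaresX/dlLogs | scripts/convert_logs.py | process_interesting_auras
-- ===== SOURCE A (Python) =====
-- def process_interesting_auras(tokens):
--     clean_tokens = [token.strip("()[]") for token in tokens if token.strip("()[]")]
--     return {
--         f"Aura {index+1}": {
--             "sourceGUID": clean_tokens[2 * index],
--             "auraId": clean_tokens[2 * index + 1],
--         }
--         for index in range(len(clean_tokens) // 2)
--     }
-- ===== SOURCE B (Python) =====
-- def process_interesting_auras(tokens):
--     result = {}
--     source = None
--     n = 0
--     for token in tokens:
--         cleaned = token.strip("()[]")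
--         if not cleaned:
--             continue
--         if source is None:
--             source = cleaned
--         else:
--             n += 1
--             result[f"Aura {n}"] = {"sourceGUID": source, "auraId": cleaned}
--             source = None
--     return result
-- ===== Notes on version B (the rewrite author's own statement) =====
-- stated objective: alternative
-- what changed: Replaces A's two-phase build-a-clean-list-then-index-pairs approach with a single stateful pass that strips each token, skips empties, holds a pending source and emits an aura entry on every second cleaned token (a dangling source is never flushed).
import Mathlib
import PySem

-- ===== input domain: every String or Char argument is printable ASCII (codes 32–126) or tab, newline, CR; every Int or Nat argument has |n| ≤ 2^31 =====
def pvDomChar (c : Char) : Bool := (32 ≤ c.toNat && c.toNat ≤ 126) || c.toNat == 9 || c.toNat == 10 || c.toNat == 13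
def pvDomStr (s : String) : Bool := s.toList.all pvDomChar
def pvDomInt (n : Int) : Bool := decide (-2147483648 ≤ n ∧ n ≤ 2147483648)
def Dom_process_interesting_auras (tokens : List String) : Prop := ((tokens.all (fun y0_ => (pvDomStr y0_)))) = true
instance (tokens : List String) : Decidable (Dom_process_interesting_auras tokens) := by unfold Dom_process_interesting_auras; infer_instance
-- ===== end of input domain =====

-- B replaces A's two-phase build-clean-list-then-index-pairs with a single stateful pass
-- (pending source + counter); same result, no speed claim.

-- ===== PORT A =====
def process_interesting_auras (tokens : List String) : List (String × List (String × String)) :=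
  -- clean_tokens = [token.strip("()[]") for token in tokens if token.strip("()[]")]
  let clean_tokens := tokens.filterMap (fun token =>
    let c := PySem.Str.stripChars token "()[]"
    if c = "" then none else some c)
  -- dict comprehension over range(len(clean_tokens) // 2), ported as a fold of Dict.insert
  ((PySem.List.pyRange 0 (PySem.Int.floordiv (PySem.List.len clean_tokens) 2) 1).foldl
    (fun d index =>
      d.insert ("Aura " ++ PySem.Int.toStr (index + 1))
        [("sourceGUID", PySem.List.pyGetD clean_tokens (2 * index) ""),
         ("auraId", PySem.List.pyGetD clean_tokens (2 * index + 1) "")])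
    PySem.Dict.empty).items

-- ===== PORT B =====
def pvAltGo : List String → PySem.Dict String (List (String × String)) → Option String → Int →
    PySem.Dict String (List (String × String))
  | [], result, _, _ => result
  | token :: rest, result, source, n =>
    let cleaned := PySem.Str.stripChars token "()[]"
    if cleaned = "" then pvAltGo rest result source n
    else match source with
      | none => pvAltGo rest result (some cleaned) n
      | some s =>
        pvAltGo rest
          (result.insert ("Aura " ++ PySem.Int.toStr (n + 1))
            [("sourceGUID", s), ("auraId", cleaned)])
          none (n + 1)

def process_interesting_auras_alt (tokens : List String) : List (String × List (String × String)) :=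
  (pvAltGo tokens PySem.Dict.empty none 0).items

-- ===== PRECONDITION & SPEC =====
def Spec_process_interesting_auras (tokens : List String) (out : List (String × List (String × String))) : Prop := out = process_interesting_auras_alt tokens
instance (tokens : List String) (out : List (String × List (String × String))) : Decidable (Spec_process_interesting_auras tokens out) := by unfold Spec_process_interesting_auras; infer_instance

-- ===== CLAIM (what is proved, stated in full; the proofs are below) =====
def Claim_equal_process_interesting_auras : Prop := ∀ (tokens : List String), Dom_process_interesting_auras tokens → Spec_process_interesting_auras tokens (process_interesting_auras tokens)

-- ===== LEMMAS AND PROOFS =====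

-- decimal string of n, injectivity machinery ------------------------------------------------

def pvD (n : Nat) : List Char :=
  if n = 0 then ['0'] else ((Nat.digits 10 n).map Nat.digitChar).reverse

theorem pvToDigitsCore_eq : ∀ (n : Nat), ∀ (f : Nat) (ds : List Char), n < f →
    Nat.toDigitsCore 10 f n ds = pvD n ++ ds := by
  intro n
  induction n using Nat.strong_induction_on with
  | _ n ih =>
    intro f ds hf
    match f with
    | 0 => omega
    | f + 1 =>
      rw [Nat.toDigitsCore]
      by_cases h0 : n / 10 = 0
      · simp only [h0, if_pos]
        by_cases hn : n = 0
        · subst hn; simp [pvD]; decide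
        · have hlt : n < 10 := by omega
          have : Nat.digits 10 n = [n % 10] := by
            rw [Nat.digits_def' (by norm_num) (Nat.pos_of_ne_zero hn), h0]
            simp
          simp [pvD, hn, this]
      · simp only [h0, if_false]
        have hdm := Nat.div_add_mod n 10
        have hmlt : n % 10 < 10 := Nat.mod_lt _ (by norm_num)
        have hnd : n / 10 < n := Nat.div_lt_self (by omega) (by norm_num)
        have hfd : n / 10 < f := by omega
        rw [ih (n / 10) hnd f _ hfd]
        have hpos : 0 < n := by omega
        have hD : pvD n = pvD (n / 10) ++ [(n % 10).digitChar] := by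
          unfold pvD
          rw [if_neg (by omega), if_neg h0, Nat.digits_def' (b := 10) (by norm_num) hpos]
          simp
        rw [hD]
        simp

theorem pvDigitChar_inj : ∀ a b : Nat, a < 10 → b < 10 → Nat.digitChar a = Nat.digitChar b → a = b := by
  intro a b ha hb h
  interval_cases a <;> interval_cases b <;> simp_all [Nat.digitChar]

theorem pvMapDigitChar_inj : ∀ (l1 l2 : List Nat), (∀ x ∈ l1, x < 10) → (∀ x ∈ l2, x < 10) →
    l1.map Nat.digitChar = l2.map Nat.digitChar → l1 = l2 := by
  intro l1
  induction l1 with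
  | nil => intro l2 _ _ h; cases l2 <;> simp_all
  | cons a t ih =>
    intro l2 h1 h2 h
    cases l2 with
    | nil => simp_all
    | cons b t2 =>
      simp only [List.map_cons, List.cons.injEq] at h
      have ha := pvDigitChar_inj a b (h1 a (by simp)) (h2 b (by simp)) h.1
      have := ih t2 (fun x hx => h1 x (by simp [hx])) (fun x hx => h2 x (by simp [hx])) h.2
      simp [ha, this]

theorem pvToDigits_inj (m n : Nat) (hm : 0 < m) (hn : 0 < n)
    (h : Nat.toDigits 10 m = Nat.toDigits 10 n) : m = n := by
  rw [Nat.toDigits, Nat.toDigits, pvToDigitsCore_eq m (m+1) [] (by omega),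
    pvToDigitsCore_eq n (n+1) [] (by omega)] at h
  simp only [List.append_nil] at h
  unfold pvD at h
  rw [if_neg (by omega), if_neg (by omega)] at h
  have h' := List.reverse_injective h
  have hd := pvMapDigitChar_inj _ _ (fun x hx => Nat.digits_lt_base (by norm_num) hx)
    (fun x hx => Nat.digits_lt_base (by norm_num) hx) h'
  calc m = Nat.ofDigits 10 (Nat.digits 10 m) := (Nat.ofDigits_digits 10 m).symm
    _ = Nat.ofDigits 10 (Nat.digits 10 n) := by rw [hd]
    _ = n := Nat.ofDigits_digits 10 n

theorem pvToStr_inj (a b : Int) (ha : 0 < a) (hb : 0 < b)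
    (h : PySem.Int.toStr a = PySem.Int.toStr b) : a = b := by
  have hc : PySem.Int.toChars a = PySem.Int.toChars b := by
    rw [← PySem.Int.toList_toStr, ← PySem.Int.toList_toStr, h]
  unfold PySem.Int.toChars at hc
  rw [if_neg (by omega), if_neg (by omega)] at hc
  have := pvToDigits_inj a.toNat b.toNat (by omega) (by omega) hc
  omega

theorem pvKey_inj (a b : Int) (ha : 0 < a) (hb : 0 < b)
    (h : "Aura " ++ PySem.Int.toStr a = "Aura " ++ PySem.Int.toStr b) : a = b := by
  apply pvToStr_inj a b ha hb
  have := congrArg String.toList h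
  rw [String.toList_append, String.toList_append] at this
  have := List.append_cancel_left this
  exact String.toList_injective this

-- the common pairing function ---------------------------------------------------------------

def pvClean (tokens : List String) : List String :=
  tokens.filterMap (fun token =>
    let c := PySem.Str.stripChars token "()[]"
    if c = "" then none else some c)

def pvPairs : List String → Int → List (String × List (String × String))
  | x :: y :: r, n =>
    ("Aura " ++ PySem.Int.toStr (n + 1), [("sourceGUID", x), ("auraId", y)]) :: pvPairs r (n + 1)
  | _, _ => []

-- B computes pvPairs ------------------------------------------------------------------------

theorem pvAltGo_eq : ∀ (ts : List String) (d : PySem.Dict String (List (String × String)))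
    (s : Option String) (n : Int), 0 ≤ n →
    (∀ k ∈ d.keys, ∃ j : Int, 1 ≤ j ∧ j ≤ n ∧ k = "Aura " ++ PySem.Int.toStr j) →
    (pvAltGo ts d s n).items = d.items ++ pvPairs (s.toList ++ pvClean ts) n := by
  intro ts
  induction ts with
  | nil =>
    intro d s n _ _
    cases s <;> simp [pvAltGo, pvClean, pvPairs]
  | cons t rest ih =>
    intro d s n hn hkeys
    simp only [pvAltGo]
    by_cases hc : PySem.Str.stripChars t "()[]" = ""
    · rw [if_pos hc, ih d s n hn hkeys]
      simp [pvClean, hc]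
    · rw [if_neg hc]
      cases s with
      | none =>
        rw [ih d _ n hn hkeys]
        simp [pvClean, hc]
      | some sv =>
        have hfresh : d.contains ("Aura " ++ PySem.Int.toStr (n + 1)) = false := by
          by_contra habs
          have : d.contains ("Aura " ++ PySem.Int.toStr (n + 1)) = true := by
            revert habs; cases d.contains ("Aura " ++ PySem.Int.toStr (n + 1)) <;> simp
          obtain ⟨j, hj1, hj2, hj3⟩ := hkeys _ ((PySem.Dict.contains_iff_mem_keys d _).mp this)
          have := pvKey_inj j (n + 1) (by omega) (by omega) hj3.symm
          omega
        rw [ih _ none (n + 1) (by omega) ?_]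
        · rw [PySem.Dict.items_insert_of_not_contains _ _ hfresh]
          simp [pvClean, hc, pvPairs]
        · intro k hk
          rw [PySem.Dict.mem_keys_insert] at hk
          rcases hk with hk | hk
          · exact ⟨n + 1, by omega, by omega, hk⟩
          · obtain ⟨j, hj1, hj2, hj3⟩ := hkeys k hk
            exact ⟨j, hj1, by omega, hj3⟩

theorem pvAlt_eq (tokens : List String) :
    process_interesting_auras_alt tokens = pvPairs (pvClean tokens) 0 := by
  unfold process_interesting_auras_alt
  rw [pvAltGo_eq tokens PySem.Dict.empty none 0 le_rfl (by simp [PySem.Dict.keys_empty])]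
  simp [PySem.Dict.empty]

-- A computes pvPairs ------------------------------------------------------------------------

theorem pvPairs_eq_map : ∀ (l : List String) (n : Int), 0 ≤ n →
    pvPairs l n = (List.range (l.length / 2)).map (fun (k : Nat) =>
      ("Aura " ++ PySem.Int.toStr (n + (k : Int) + 1),
       [("sourceGUID", PySem.List.pyGetD l (2 * (k : Int)) ""),
        ("auraId", PySem.List.pyGetD l (2 * (k : Int) + 1) "")]))
  | [], n => by intro _; simp [pvPairs]
  | [x], n => by intro _; simp [pvPairs]
  | x :: y :: r, n => by
    intro hn
    have ih := pvPairs_eq_map r (n + 1) (by omega)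
    have hlen : (x :: y :: r).length / 2 = r.length / 2 + 1 := by simp; omega
    rw [pvPairs, ih, hlen, List.range_succ_eq_map, List.map_cons, List.map_map]
    congr 1
    · simp [PySem.List.pyGetD]
    · apply List.map_congr_left
      intro k _
      simp only [Function.comp_apply, Nat.succ_eq_add_one]
      have h1 : n + ((k + 1 : Nat) : Int) + 1 = n + 1 + (k : Int) + 1 := by push_cast; ring
      have h2 : (2 : Int) * ((k + 1 : Nat) : Int) = ((2 * k + 2 : Nat) : Int) := by push_cast; ring
      have h3 : ((2 * k + 2 : Nat) : Int) + 1 = ((2 * k + 3 : Nat) : Int) := by push_cast; ring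
      have h4 : (2 : Int) * ((k : Nat) : Int) = ((2 * k : Nat) : Int) := by push_cast; ring
      have h5 : (2 : Int) * ((k : Nat) : Int) + 1 = ((2 * k + 1 : Nat) : Int) := by push_cast; ring
      rw [h1, h2, h3, h5, h4]
      simp only [PySem.List.pyGetD_natCast]
      have g1 : (x :: y :: r).getD (2 * k + 2) "" = r.getD (2 * k) "" := by
        rw [show 2 * k + 2 = (2 * k + 1) + 1 from rfl, List.getD_cons_succ,
          show 2 * k + 1 = (2 * k) + 1 from rfl, List.getD_cons_succ]
      have g2 : (x :: y :: r).getD (2 * k + 3) "" = r.getD (2 * k + 1) "" := by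
        rw [show 2 * k + 3 = (2 * k + 2) + 1 from rfl, List.getD_cons_succ,
          show 2 * k + 2 = (2 * k + 1) + 1 from rfl, List.getD_cons_succ]
      rw [g1, g2]

theorem pvA_eq (tokens : List String) :
    process_interesting_auras tokens = pvPairs (pvClean tokens) 0 := by
  have hrfl : process_interesting_auras tokens =
      ((PySem.List.pyRange 0 (PySem.Int.floordiv (PySem.List.len (pvClean tokens)) 2) 1).foldl
        (fun d index => d.insert ("Aura " ++ PySem.Int.toStr (index + 1))
          [("sourceGUID", PySem.List.pyGetD (pvClean tokens) (2 * index) ""),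
           ("auraId", PySem.List.pyGetD (pvClean tokens) (2 * index + 1) "")])
        PySem.Dict.empty).items := rfl
  rw [hrfl]
  have hM : PySem.Int.floordiv (PySem.List.len (pvClean tokens)) 2
      = (((pvClean tokens).length / 2 : Nat) : Int) := by
    simp only [PySem.Int.floordiv, PySem.List.len_eq]
    rw [Int.fdiv_eq_ediv_of_nonneg _ (by norm_num)]
    exact Eq.symm (Nat.ToInt.div_congr rfl rfl)
  rw [hM]
  rw [PySem.Dict.items_foldl_insert_fresh
    (PySem.List.pyRange 0 ((((pvClean tokens).length / 2 : Nat)) : Int) 1)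
    (fun index => "Aura " ++ PySem.Int.toStr (index + 1))
    (fun index => [("sourceGUID", PySem.List.pyGetD (pvClean tokens) (2 * index) ""),
                   ("auraId", PySem.List.pyGetD (pvClean tokens) (2 * index + 1) "")])
    PySem.Dict.empty
    (fun a _ => PySem.Dict.contains_empty _)
    (List.Nodup.map_on
      (fun i hi j hj hij => by
        have hi0 := (PySem.List.mem_pyRange_one.mp hi).1
        have hj0 := (PySem.List.mem_pyRange_one.mp hj).1
        have := pvKey_inj (i + 1) (j + 1) (by omega) (by omega) hij
        omega)
      (PySem.List.nodup_pyRange_one 0 _))]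
  rw [pvPairs_eq_map (pvClean tokens) 0 le_rfl, PySem.List.pyRange_one]
  simp only [PySem.Dict.empty, List.map_map, Int.sub_zero, Int.toNat_natCast]
  apply List.map_congr_left
  intro k _
  simp

-- ===== VERDICT (by name: the statement is the Claim_ definition above) =====
theorem process_interesting_auras_spec : Claim_equal_process_interesting_auras := by
  intro tokens _
  unfold Spec_process_interesting_auras
  rw [pvA_eq, pvAlt_eq]
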